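-- pv_equiv track=rewrite | github.com/kkad2176/IA-CARE | app.py | extraire_nom_medicament_debut_ligne
-- ===== SOURCE A (Python) =====
-- def extraire_nom_medicament_debut_ligne(txt):
--     if not txt:
--         return ""
--
--     t = str(txt).strip()
--
--     separateurs = [
--         " mg", " g", " ml", " µg", " mcg", " ui", "%",
--         " comprimé", " comprimés", " cp", " gélule", " gélules",
--         " sachet", " sachets", " ampoule", " ampoules",
--         " gel", " crème", " creme", " pommade", " spray",
--         " matin", " midi", " soir",
--         " 1/jour", " 2/jour", " 3/jour",
--         " bouffée", " bouffées", " si besoin",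
--         " application", " appliquer"
--     ]
--
--     t_lower = " " + t.lower()
--
--     positions = []
--     for sep in separateurs:
--         pos = t_lower.find(sep)
--         if pos != -1:
--             positions.append(pos)
--
--     if positions:
--         cut = min(positions)
--         nom = t[:cut].strip(" -,:;")
--     else:
--         nom = t.strip(" -,:;")
--
--     return nom
-- ===== SOURCE B (Python) =====
-- def extraire_nom_medicament_debut_ligne(txt):
--     if not txt:
--         return ""
--
--     t = str(txt).strip()
--
--     separateurs = [
--         " mg", " g", " ml", " µg", " mcg", " ui", "%",
--         " comprimé", " comprimés", " cp", " gélule", " gélules",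
--         " sachet", " sachets", " ampoule", " ampoules",
--         " gel", " crème", " creme", " pommade", " spray",
--         " matin", " midi", " soir",
--         " 1/jour", " 2/jour", " 3/jour",
--         " bouffée", " bouffées", " si besoin",
--         " application", " appliquer"
--     ]
--
--     # one left-to-right pass: the first position where ANY separator starts
--     # equals the minimum over the separators' first occurrences
--     s = " " + t.lower()
--     cut = len(t)
--     for i in range(len(s)):
--         if any(s.startswith(sep, i) for sep in separateurs):
--             cut = i
--             break
--
--     return t[:cut].strip(" -,:;")
-- ===== Notes on version B (the rewrite author's own statement) =====
-- stated objective: alternative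
-- what changed: Replaces the separator-major pass (one find() scan per separator, collect positions, take min) by a single position-major left-to-right scan that stops at the first index where any separator starts, which equals the minimum of the first-occurrence positions.
import Mathlib
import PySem

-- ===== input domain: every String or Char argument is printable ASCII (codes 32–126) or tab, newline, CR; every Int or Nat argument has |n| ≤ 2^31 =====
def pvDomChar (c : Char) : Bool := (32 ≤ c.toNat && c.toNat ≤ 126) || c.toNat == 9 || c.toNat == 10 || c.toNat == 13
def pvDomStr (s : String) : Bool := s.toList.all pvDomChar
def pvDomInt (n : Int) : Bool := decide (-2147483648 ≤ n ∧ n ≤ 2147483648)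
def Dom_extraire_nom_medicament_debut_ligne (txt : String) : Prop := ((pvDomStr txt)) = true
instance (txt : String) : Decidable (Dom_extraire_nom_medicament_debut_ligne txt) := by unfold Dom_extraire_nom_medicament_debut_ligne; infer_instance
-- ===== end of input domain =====

-- B replaces A's separator-major pass (one find per separator, then min of the positions)
-- by a single position-major left-to-right scan stopping at the first index where any
-- separator starts; same return value (objective: alternative, no speed claim).

-- ===== PORT A =====
-- the separator list (identical literal in both Pythons)
def pvSeparateurs : List (List Char) :=
  [" mg".toList, " g".toList, " ml".toList, " µg".toList, " mcg".toList, " ui".toList, "%".toList,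
   " comprimé".toList, " comprimés".toList, " cp".toList, " gélule".toList, " gélules".toList,
   " sachet".toList, " sachets".toList, " ampoule".toList, " ampoules".toList,
   " gel".toList, " crème".toList, " creme".toList, " pommade".toList, " spray".toList,
   " matin".toList, " midi".toList, " soir".toList,
   " 1/jour".toList, " 2/jour".toList, " 3/jour".toList,
   " bouffée".toList, " bouffées".toList, " si besoin".toList,
   " application".toList, " appliquer".toList]

def extraire_nom_medicament_debut_ligne (txt : String) : String :=
  if txt = "" then ""
  else
    let t := PySem.Chars.strip txt.toList
    let tLower := ' ' :: PySem.Chars.lower t           -- " " + t.lower()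
    let positions : List Int :=
      pvSeparateurs.foldl (fun positions sep =>
        let pos := PySem.Chars.find tLower sep
        if pos ≠ -1 then positions ++ [pos] else positions) []
    match PySem.List.min? positions id with
    | some cut => String.ofList (PySem.Chars.stripChars (PySem.Chars.slice t none (some cut)) " -,:;".toList)
    | none => String.ofList (PySem.Chars.stripChars t " -,:;".toList)

-- ===== PORT B =====
-- B's for-loop over i in range(len(s)) with break: first i where some separator starts at i
def pvScanSep : List Char → Nat → Option Nat
  | [], _ => none
  | c :: rest, i =>
    if pvSeparateurs.any (fun sep => PySem.Chars.startswith (c :: rest) sep) then some i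
    else pvScanSep rest (i + 1)

def extraire_nom_medicament_debut_ligne_alt (txt : String) : String :=
  if txt = "" then ""
  else
    let t := PySem.Chars.strip txt.toList
    let s := ' ' :: PySem.Chars.lower t                -- " " + t.lower()
    let cut : Nat := (pvScanSep s 0).getD t.length
    String.ofList (PySem.Chars.stripChars (PySem.Chars.slice t none (some (cut : Int))) " -,:;".toList)

-- ===== PRECONDITION & SPEC =====
def Spec_extraire_nom_medicament_debut_ligne (txt : String) (out : String) : Prop := out = extraire_nom_medicament_debut_ligne_alt txt
instance (txt : String) (out : String) : Decidable (Spec_extraire_nom_medicament_debut_ligne txt out) := by unfold Spec_extraire_nom_medicament_debut_ligne; infer_instance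

-- ===== CLAIM (what is proved, stated in full; the proofs are below) =====
def Claim_equal_extraire_nom_medicament_debut_ligne : Prop := ∀ (txt : String), Dom_extraire_nom_medicament_debut_ligne txt → Spec_extraire_nom_medicament_debut_ligne txt (extraire_nom_medicament_debut_ligne txt)

-- ===== LEMMAS AND PROOFS =====

-- "some separator starts at position d of u"
def pvMatch (u : List Char) (d : Nat) : Prop :=
  ∃ sep ∈ pvSeparateurs, sep <+: u.drop d

lemma pvSeps_ne_nil : ∀ sep ∈ pvSeparateurs, sep ≠ [] := by decide

lemma pvMatch_zero_iff (u : List Char) :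
    (pvSeparateurs.any (fun sep => PySem.Chars.startswith u sep) = true) ↔ pvMatch u 0 := by
  simp [pvMatch, List.any_eq_true, PySem.Chars.startswith_iff]

lemma pvMatch_succ_cons (c : Char) (rest : List Char) (d : Nat) :
    pvMatch (c :: rest) (d + 1) ↔ pvMatch rest d := by
  simp [pvMatch]

lemma pvMatch_nil (d : Nat) : ¬ pvMatch [] d := by
  rintro ⟨sep, hsep, hpre⟩
  exact pvSeps_ne_nil sep hsep (List.prefix_nil.mp (by simpa using hpre))

lemma pvScan_none_iff : ∀ (u : List Char) (i : Nat),
    pvScanSep u i = none ↔ ∀ d, ¬ pvMatch u d := by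
  intro u
  induction u with
  | nil =>
    intro i
    constructor
    · intro _ d
      exact pvMatch_nil d
    · intro _
      rfl
  | cons c rest ih =>
    intro i
    by_cases h : pvSeparateurs.any (fun sep => PySem.Chars.startswith (c :: rest) sep) = true
    · rw [pvScanSep, if_pos h]
      constructor
      · intro hc; cases hc
      · intro hall; exact ((hall 0) ((pvMatch_zero_iff _).mp h)).elim
    · have hm0 : ¬ pvMatch (c :: rest) 0 := fun hx => h ((pvMatch_zero_iff _).mpr hx)
      rw [pvScanSep, if_neg h, ih (i + 1)]
      constructor
      · intro hall d
        match d with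
        | 0 => exact hm0
        | Nat.succ d' => exact fun hx => hall d' ((pvMatch_succ_cons c rest d').mp hx)
      · intro hall d hx
        exact hall (d + 1) ((pvMatch_succ_cons c rest d).mpr hx)

lemma pvScan_some_iff : ∀ (u : List Char) (i m : Nat),
    pvScanSep u i = some m ↔
      i ≤ m ∧ pvMatch u (m - i) ∧ ∀ d < m - i, ¬ pvMatch u d := by
  intro u
  induction u with
  | nil =>
    intro i m
    constructor
    · intro hc; cases hc
    · rintro ⟨_, hx, _⟩
      exact (pvMatch_nil _ hx).elim
  | cons c rest ih =>
    intro i m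
    by_cases h : pvSeparateurs.any (fun sep => PySem.Chars.startswith (c :: rest) sep) = true
    · rw [pvScanSep, if_pos h]
      constructor
      · intro hsome
        injection hsome with h'
        subst h'
        refine ⟨Nat.le_refl _, ?_, ?_⟩
        · simpa [Nat.sub_self] using (pvMatch_zero_iff (c :: rest)).mp h
        · intro d hd; exact absurd hd (by omega)
      · rintro ⟨hle, _, hmin⟩
        have hmi : m = i := by
          by_contra hne
          exact (hmin 0 (by omega)) ((pvMatch_zero_iff _).mp h)
        rw [hmi]
    · have hm0 : ¬ pvMatch (c :: rest) 0 := fun hx => h ((pvMatch_zero_iff _).mpr hx)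
      rw [pvScanSep, if_neg h, ih (i + 1) m]
      constructor
      · rintro ⟨hle, hmatch, hmin⟩
        refine ⟨by omega, ?_, ?_⟩
        · have he : m - i = (m - (i + 1)) + 1 := by omega
          rw [he]
          exact (pvMatch_succ_cons c rest _).mpr hmatch
        · intro d hd
          match d with
          | 0 => exact hm0
          | Nat.succ d' =>
            exact fun hx => hmin d' (by omega) ((pvMatch_succ_cons c rest d').mp hx)
      · rintro ⟨hle, hmatch, hmin⟩
        have hne : m ≠ i := by
          rintro rfl
          exact hm0 (by simpa [Nat.sub_self] using hmatch)
        refine ⟨by omega, ?_, ?_⟩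
        · have he : m - i = (m - (i + 1)) + 1 := by omega
          rw [he] at hmatch
          exact (pvMatch_succ_cons c rest _).mp hmatch
        · intro d hd
          exact fun hx => hmin (d + 1) (by omega) ((pvMatch_succ_cons c rest d).mpr hx)

-- A's collected positions, as filter-then-map (cites PySem.List.foldl_append_if)
def pvPositions (s : List Char) : List Int :=
  (pvSeparateurs.filter (fun sep => PySem.Chars.find s sep ≠ -1)).map (PySem.Chars.find s)

lemma pvFoldl_eq_positions (s : List Char) :
    pvSeparateurs.foldl (fun positions sep =>
      let pos := PySem.Chars.find s sep
      if pos ≠ -1 then positions ++ [pos] else positions) [] = pvPositions s := by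
  simpa [pvPositions] using
    PySem.List.foldl_append_if (fun sep => decide (PySem.Chars.find s sep ≠ -1))
      (PySem.Chars.find s) pvSeparateurs []

lemma pvPrefix_drop_infix (s sep : List Char) (d : Nat) (h : sep <+: s.drop d) : sep <:+: s :=
  h.isInfix.trans (List.drop_suffix d s).isInfix

lemma pvMinNone_iff (s : List Char) :
    PySem.List.min? (pvPositions s) id = none ↔ pvScanSep s 0 = none := by
  rw [PySem.List.min?_eq_none_iff, pvScan_none_iff]
  constructor
  · intro hnil d hx
    obtain ⟨sep, hsep, hpre⟩ := hx
    have hfind : PySem.Chars.find s sep = -1 := by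
      simp only [pvPositions, List.map_eq_nil_iff, List.filter_eq_nil_iff] at hnil
      have := hnil sep hsep
      simpa using this
    exact (PySem.Chars.find_eq_neg_one_iff s sep).mp hfind (pvPrefix_drop_infix s sep d hpre)
  · intro hall
    simp only [pvPositions, List.map_eq_nil_iff, List.filter_eq_nil_iff]
    intro sep hsep
    simp only [ne_eq, decide_not, Bool.not_eq_eq_eq_not, Bool.not_true, decide_eq_false_iff_not,
      not_not]
    rw [PySem.Chars.find_eq_neg_one_iff]
    intro hinf
    obtain ⟨j, hpre⟩ := (PySem.Chars.exists_prefix_drop_iff_isIn sep s).mpr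
      ((PySem.Chars.isIn_iff_infix sep s).mpr hinf)
    exact hall j ⟨sep, hsep, hpre⟩

lemma pvMem_positions (s sep : List Char) (h : PySem.Chars.find s sep ≠ -1)
    (hsep : sep ∈ pvSeparateurs) : PySem.Chars.find s sep ∈ pvPositions s := by
  simp only [pvPositions, List.mem_map, List.mem_filter]
  exact ⟨sep, ⟨hsep, by simpa using h⟩, rfl⟩

lemma pvMinSome (s : List Char) (c : Int)
    (h : PySem.List.min? (pvPositions s) id = some c) :
    0 ≤ c ∧ pvScanSep s 0 = some c.toNat := by
  have hmem := PySem.List.min?_mem h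
  have hmin := PySem.List.min?_isMin h
  simp only [pvPositions, List.mem_map, List.mem_filter] at hmem
  obtain ⟨sep0, ⟨hsep0, hne0⟩, hfind0⟩ := hmem
  have hne0' : PySem.Chars.find s sep0 ≠ -1 := by simpa using hne0
  have hc0 : 0 ≤ c := by
    have := PySem.Chars.neg_one_le_find s sep0
    omega
  have hspec := PySem.Chars.find_spec (s := s) (sub := sep0) (by omega)
  rw [hfind0] at hspec
  refine ⟨hc0, (pvScan_some_iff s 0 c.toNat).mpr ⟨Nat.zero_le _, ?_, ?_⟩⟩
  · simpa [Nat.sub_zero] using ⟨sep0, hsep0, hspec.1⟩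
  · intro d hd
    rintro ⟨sep1, hsep1, hpre1⟩
    have hinf1 : sep1 <:+: s := pvPrefix_drop_infix s sep1 d hpre1
    have hne1 : PySem.Chars.find s sep1 ≠ -1 := by
      rw [Ne, PySem.Chars.find_eq_neg_one_iff]
      exact fun hx => hx hinf1
    have hle1 : c ≤ PySem.Chars.find s sep1 :=
      hmin _ (pvMem_positions s sep1 hne1 hsep1)
    have hfpos : 0 ≤ PySem.Chars.find s sep1 := by
      have := PySem.Chars.neg_one_le_find s sep1
      omega
    have hspec1 := PySem.Chars.find_spec (s := s) (sub := sep1) hfpos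
    have hd1 : (PySem.Chars.find s sep1).toNat ≤ d := by
      by_contra hlt
      exact hspec1.2 d (by omega) hpre1
    omega

-- ===== VERDICT (by name: the statement is the Claim_ definition above) =====
theorem extraire_nom_medicament_debut_ligne_spec : Claim_equal_extraire_nom_medicament_debut_ligne := by
  unfold Claim_equal_extraire_nom_medicament_debut_ligne Spec_extraire_nom_medicament_debut_ligne
  intro txt _
  unfold extraire_nom_medicament_debut_ligne extraire_nom_medicament_debut_ligne_alt
  by_cases htxt : txt = ""
  · simp [htxt]
  · rw [if_neg htxt, if_neg htxt]
    dsimp only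
    rw [pvFoldl_eq_positions]
    cases hmin : PySem.List.min? (pvPositions (' ' :: PySem.Chars.lower (PySem.Chars.strip txt.toList))) id with
    | none =>
      rw [(pvMinNone_iff _).mp hmin]
      simp only [Option.getD_none, PySem.Chars.slice_eq_listSlice,
        PySem.List.slice_to _ (by positivity : (0:Int) ≤ ((PySem.Chars.strip txt.toList).length : Int)),
        Int.toNat_natCast, List.take_length]
    | some c =>
      obtain ⟨hc0, hscan⟩ := pvMinSome _ c hmin
      rw [hscan]
      simp only [Option.getD_some, Int.toNat_of_nonneg hc0]
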